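-- pv_equiv track=rewrite | github.com/v-tao/nats-bench-landscape | modules/metrics.py | strong_basins
-- ===== SOURCE A (Python) =====
-- def strong_basins(weak_basins_dict):
--     # given a dictionary of weak basins of optima, find the strong basins of the corresponding optima
--     basins = weak_basins_dict.values()
--     not_unique = set()
--     # get all of the archs that appear in more than one weak basin
--     for basin1 in basins:
--         for basin2 in basins:
--             if basin1 != basin2:
--                 not_unique.update(basin1 & basin2)
--     strong_basins_dict = dict()
--     for k in weak_basins_dict.keys():
--         strong_basins_dict[k] = weak_basins_dict[k] - not_unique
--     return strong_basins_dict
-- ===== SOURCE B (Python) =====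
-- def strong_basins(weak_basins_dict):
--     # given a dictionary of weak basins of optima, find the strong basins of the corresponding optima
--     # one counting pass over the distinct basin values instead of comparing every pair of basins
--     distinct = []
--     for basin in weak_basins_dict.values():
--         if basin not in distinct:
--             distinct.append(basin)
--     counts = {}
--     for basin in distinct:
--         for x in basin:
--             counts[x] = counts.get(x, 0) + 1
--     not_unique = {x for x, c in counts.items() if c >= 2}
--     return {k: weak_basins_dict[k] - not_unique for k in weak_basins_dict}
-- ===== Notes on version B (the rewrite author's own statement) =====
-- stated objective: faster
-- what changed: Instead of intersecting every pair of basins (O(B^2) set intersections), B dedups the basin values once and makes a single counting pass over their elements, marking as not-unique every element occurring in at least two distinct basin values.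
import Mathlib
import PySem

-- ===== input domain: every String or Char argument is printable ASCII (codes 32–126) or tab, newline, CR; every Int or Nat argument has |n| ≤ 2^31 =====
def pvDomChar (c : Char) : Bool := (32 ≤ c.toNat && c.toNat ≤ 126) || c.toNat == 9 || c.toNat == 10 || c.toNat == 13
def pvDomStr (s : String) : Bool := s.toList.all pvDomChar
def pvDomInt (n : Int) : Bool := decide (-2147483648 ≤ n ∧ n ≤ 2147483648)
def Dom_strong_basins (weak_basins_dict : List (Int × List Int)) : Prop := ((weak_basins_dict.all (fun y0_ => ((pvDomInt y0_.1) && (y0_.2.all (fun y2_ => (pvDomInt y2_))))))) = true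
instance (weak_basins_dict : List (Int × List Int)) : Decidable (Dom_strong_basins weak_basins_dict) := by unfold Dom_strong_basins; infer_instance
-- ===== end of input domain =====

-- B replaces A's pairwise basin intersections by a single counting pass over the deduplicated
-- basin values (an element is not-unique iff it lies in at least two distinct basin values).


-- ===== PORT A =====
-- the nested 'for basin1 in basins: for basin2 in basins:' loop collecting basin1 & basin2
def pvNotUniqueA (basins : List (List Int)) : PySem.Set Int :=
  basins.foldl (fun nu basin1 =>
    basins.foldl (fun nu basin2 =>
      if !(PySem.Set.equal basin1 basin2) then PySem.Set.update nu (PySem.Set.inter basin1 basin2) else nu) nu)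
    PySem.Set.empty

def strong_basins (weak_basins_dict : List (Int × List Int)) : List (Int × List Int) :=
  let d := PySem.Dict.mk weak_basins_dict
  let notUnique := pvNotUniqueA d.values
  (d.keys.foldl (fun sbd k =>
    sbd.insert k (PySem.Set.diff (d.getD k []) notUnique)) PySem.Dict.empty).items

-- ===== PORT B =====
-- 'for basin in values: if basin not in distinct: distinct.append(basin)'  ('in' = set equality)
def pvDistinct (basins : List (List Int)) : List (List Int) :=
  basins.foldl (fun acc b => if acc.any (fun x => PySem.Set.equal x b) then acc else acc ++ [b]) []

-- counts[x] = counts.get(x, 0) + 1 over each distinct basin, then {x for x, c in counts.items() if c >= 2}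
def pvNotUniqueB (basins : List (List Int)) : PySem.Set Int :=
  ((pvDistinct basins).foldl
    (fun c b => b.foldl (fun c x => c.modify x 0 (· + 1)) c)
    (PySem.Dict.empty : PySem.Dict Int Int)).items.foldl
    (fun s p => if 2 ≤ p.2 then PySem.Set.add s p.1 else s) PySem.Set.empty

def strong_basins_alt (weak_basins_dict : List (Int × List Int)) : List (Int × List Int) :=
  let d := PySem.Dict.mk weak_basins_dict
  let notUnique := pvNotUniqueB d.values
  (d.keys.foldl (fun sbd k =>
    sbd.insert k (PySem.Set.diff (d.getD k []) notUnique)) PySem.Dict.empty).items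

-- ===== PRECONDITION & SPEC =====
-- Pre_ only requires that each value list is a valid encoding of a Python set (no duplicate
-- elements): A's argument is a dict of SETS, so no Python input corresponds to a value list
-- with duplicates; Pre_ excludes nothing A is ever run on.
def Pre_strong_basins (weak_basins_dict : List (Int × List Int)) : Prop :=
  ∀ p ∈ weak_basins_dict, p.2.Nodup
instance (weak_basins_dict : List (Int × List Int)) : Decidable (Pre_strong_basins weak_basins_dict) := by unfold Pre_strong_basins; infer_instance

def pvWitness_strong_basins : (List (Int × List Int)) := [(1, [2, 3]), (2, [3, 4]), (3, [5])]

def Spec_strong_basins (weak_basins_dict : List (Int × List Int)) (out : List (Int × List Int)) : Prop := out = strong_basins_alt weak_basins_dict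
instance (weak_basins_dict : List (Int × List Int)) (out : List (Int × List Int)) : Decidable (Spec_strong_basins weak_basins_dict out) := by unfold Spec_strong_basins; infer_instance

-- ===== CLAIM (what is proved, stated in full; the proofs are below) =====
def Claim_equal_strong_basins : Prop := ∀ (weak_basins_dict : List (Int × List Int)), Dom_strong_basins weak_basins_dict → Pre_strong_basins weak_basins_dict → Spec_strong_basins weak_basins_dict (strong_basins weak_basins_dict)

-- ===== LEMMAS AND PROOFS =====

theorem pvEqual_iff (a b : List Int) : PySem.Set.equal a b = true ↔ ∀ x : Int, x ∈ a ↔ x ∈ b := by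
  simp only [PySem.Set.equal, PySem.Set.issubset, PySem.Set.contains, Bool.and_eq_true,
    List.all_eq_true, List.contains_iff_mem]
  constructor
  · rintro ⟨h1, h2⟩ x; exact ⟨fun hx => h1 x hx, fun hx => h2 x hx⟩
  · intro h; exact ⟨fun x hx => (h x).1 hx, fun x hx => (h x).2 hx⟩

theorem pvMem_inter (a b : List Int) (x : Int) : x ∈ PySem.Set.inter a b ↔ x ∈ a ∧ x ∈ b := by
  simp [PySem.Set.inter, PySem.Set.contains, List.mem_filter]

-- characterization of A's inner loop
theorem pvMemA_inner (b1 : List Int) (l : List (List Int)) (nu : PySem.Set Int) (x : Int) :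
    x ∈ l.foldl (fun nu basin2 =>
      if !(PySem.Set.equal b1 basin2) then PySem.Set.update nu (PySem.Set.inter b1 basin2) else nu) nu ↔
    x ∈ nu ∨ ∃ b2 ∈ l, PySem.Set.equal b1 b2 = false ∧ x ∈ b1 ∧ x ∈ b2 := by
  induction l generalizing nu with
  | nil => simp
  | cons h t ih =>
    simp only [List.foldl_cons]
    rw [ih]
    by_cases he : PySem.Set.equal b1 h = true
    · rw [if_neg (by simp [he])]
      constructor
      · rintro (hx | hx)
        · exact Or.inl hx
        · exact Or.inr (by obtain ⟨b2, hb2, hr⟩ := hx; exact ⟨b2, List.mem_cons_of_mem _ hb2, hr⟩)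
      · rintro (hx | ⟨b2, hb2, hne, hx1, hx2⟩)
        · exact Or.inl hx
        · rcases List.mem_cons.mp hb2 with rfl | hb2
          · simp [he] at hne
          · exact Or.inr ⟨b2, hb2, hne, hx1, hx2⟩
    · rw [Bool.not_eq_true] at he
      rw [if_pos (by simp [he]), PySem.Set.mem_update, pvMem_inter]
      constructor
      · rintro ((hx | hx) | hx)
        · exact Or.inl hx
        · exact Or.inr ⟨h, List.mem_cons_self, he, hx⟩
        · obtain ⟨b2, hb2, hr⟩ := hx; exact Or.inr ⟨b2, List.mem_cons_of_mem _ hb2, hr⟩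
      · rintro (hx | ⟨b2, hb2, hne, hx1, hx2⟩)
        · exact Or.inl (Or.inl hx)
        · rcases List.mem_cons.mp hb2 with rfl | hb2
          · exact Or.inl (Or.inr ⟨hx1, hx2⟩)
          · exact Or.inr ⟨b2, hb2, hne, hx1, hx2⟩

theorem pvMemA_outer (outer full : List (List Int)) (nu : PySem.Set Int) (x : Int) :
    x ∈ outer.foldl (fun nu basin1 =>
      full.foldl (fun nu basin2 =>
        if !(PySem.Set.equal basin1 basin2) then PySem.Set.update nu (PySem.Set.inter basin1 basin2) else nu) nu) nu ↔
    x ∈ nu ∨ ∃ b1 ∈ outer, ∃ b2 ∈ full, PySem.Set.equal b1 b2 = false ∧ x ∈ b1 ∧ x ∈ b2 := by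
  induction outer generalizing nu with
  | nil => simp
  | cons h t ih =>
    simp only [List.foldl_cons]
    rw [ih, pvMemA_inner]
    constructor
    · rintro ((hx | ⟨b2, hb2, hr⟩) | ⟨b1, hb1, hr⟩)
      · exact Or.inl hx
      · exact Or.inr ⟨h, List.mem_cons_self, b2, hb2, hr⟩
      · exact Or.inr ⟨b1, List.mem_cons_of_mem _ hb1, hr⟩
    · rintro (hx | ⟨b1, hb1, hr⟩)
      · exact Or.inl (Or.inl hx)
      · rcases List.mem_cons.mp hb1 with rfl | hb1
        · exact Or.inl (Or.inr hr)
        · exact Or.inr ⟨b1, hb1, hr⟩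

theorem pvMemA (l : List (List Int)) (x : Int) :
    x ∈ pvNotUniqueA l ↔ ∃ b1 ∈ l, ∃ b2 ∈ l, PySem.Set.equal b1 b2 = false ∧ x ∈ b1 ∧ x ∈ b2 := by
  unfold pvNotUniqueA
  rw [pvMemA_outer]
  simp [PySem.Set.empty]

-- pvDistinct facts
theorem pvDistinct_aux_mono (l : List (List Int)) (acc : List (List Int)) :
    ∀ b ∈ acc, b ∈ l.foldl (fun acc b => if acc.any (fun x => PySem.Set.equal x b) then acc else acc ++ [b]) acc := by
  induction l generalizing acc with
  | nil => simp
  | cons h t ih =>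
    intro b hb
    simp only [List.foldl_cons]
    split
    · exact ih _ _ hb
    · exact ih _ _ (List.mem_append_left _ hb)

theorem pvDistinct_aux_sub (l : List (List Int)) (acc : List (List Int)) :
    ∀ b ∈ l.foldl (fun acc b => if acc.any (fun x => PySem.Set.equal x b) then acc else acc ++ [b]) acc,
      b ∈ acc ∨ b ∈ l := by
  induction l generalizing acc with
  | nil => simp
  | cons h t ih =>
    intro b hb
    simp only [List.foldl_cons] at hb
    split at hb
    · rcases ih _ _ hb with h1 | h1
      · exact Or.inl h1
      · exact Or.inr (List.mem_cons_of_mem _ h1)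
    · rcases ih _ _ hb with h1 | h1
      · rcases List.mem_append.mp h1 with h2 | h2
        · exact Or.inl h2
        · simp only [List.mem_singleton] at h2; subst h2; exact Or.inr List.mem_cons_self
      · exact Or.inr (List.mem_cons_of_mem _ h1)

theorem pvDistinct_aux_cover (l : List (List Int)) (acc : List (List Int)) :
    ∀ b ∈ l, ∃ r ∈ l.foldl (fun acc b => if acc.any (fun x => PySem.Set.equal x b) then acc else acc ++ [b]) acc,
      PySem.Set.equal r b = true := by
  induction l generalizing acc with
  | nil => simp
  | cons h t ih =>
    intro b hb
    simp only [List.foldl_cons]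
    rcases List.mem_cons.mp hb with rfl | hb
    · by_cases hc : acc.any (fun x => PySem.Set.equal x b) = true
      · rw [if_pos hc]
        obtain ⟨r, hr, hre⟩ := List.any_eq_true.mp hc
        exact ⟨r, pvDistinct_aux_mono _ _ _ hr, hre⟩
      · rw [if_neg hc]
        refine ⟨b, pvDistinct_aux_mono _ _ _ (List.mem_append_right _ (by simp)), ?_⟩
        rw [pvEqual_iff]; intro x; rfl
    · split
      · exact ih _ _ hb
      · exact ih _ _ hb

theorem pvDistinct_aux_pairwise (l : List (List Int)) (acc : List (List Int))
    (hacc : acc.Pairwise (fun a b => PySem.Set.equal a b = false)) :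
    (l.foldl (fun acc b => if acc.any (fun x => PySem.Set.equal x b) then acc else acc ++ [b]) acc).Pairwise
      (fun a b => PySem.Set.equal a b = false) := by
  induction l generalizing acc with
  | nil => exact hacc
  | cons h t ih =>
    simp only [List.foldl_cons]
    by_cases hc : acc.any (fun x => PySem.Set.equal x h) = true
    · rw [if_pos hc]; exact ih _ hacc
    · rw [if_neg hc]
      refine ih _ ?_
      rw [List.pairwise_append]
      refine ⟨hacc, List.pairwise_singleton _ _, ?_⟩
      intro a ha b hb
      rw [List.mem_singleton] at hb
      cases heq : PySem.Set.equal a b with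
      | false => rfl
      | true => exact absurd (List.any_eq_true.mpr ⟨a, ha, hb ▸ heq⟩) hc

theorem pvDistinct_mem_of_mem (l : List (List Int)) (b : List Int) (hb : b ∈ pvDistinct l) : b ∈ l := by
  rcases pvDistinct_aux_sub l [] b hb with h | h
  · simp at h
  · exact h

theorem pvDistinct_cover (l : List (List Int)) (b : List Int) (hb : b ∈ l) :
    ∃ r ∈ pvDistinct l, PySem.Set.equal r b = true :=
  pvDistinct_aux_cover l [] b hb

theorem pvDistinct_pairwise (l : List (List Int)) :
    (pvDistinct l).Pairwise (fun a b => PySem.Set.equal a b = false) :=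
  pvDistinct_aux_pairwise l [] (List.Pairwise.nil)

-- B's membership via the counter
theorem pvMemB_fold (items : List (Int × Int)) (s0 : PySem.Set Int) (x : Int) :
    x ∈ items.foldl (fun s p => if 2 ≤ p.2 then PySem.Set.add s p.1 else s) s0 ↔
    x ∈ s0 ∨ ∃ p ∈ items, 2 ≤ p.2 ∧ p.1 = x := by
  induction items generalizing s0 with
  | nil => simp
  | cons h t ih =>
    simp only [List.foldl_cons]
    by_cases hc : 2 ≤ h.2
    · rw [if_pos hc, ih, PySem.Set.mem_add]
      constructor
      · rintro ((hx | hx) | ⟨p, hp, hr⟩)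
        · exact Or.inl hx
        · exact Or.inr ⟨h, List.mem_cons_self, hc, hx.symm⟩
        · exact Or.inr ⟨p, List.mem_cons_of_mem _ hp, hr⟩
      · rintro (hx | ⟨p, hp, h2, rfl⟩)
        · exact Or.inl (Or.inl hx)
        · rcases List.mem_cons.mp hp with rfl | hp
          · exact Or.inl (Or.inr rfl)
          · exact Or.inr ⟨p, hp, h2, rfl⟩
    · rw [if_neg hc, ih]
      constructor
      · rintro (hx | ⟨p, hp, hr⟩)
        · exact Or.inl hx
        · exact Or.inr ⟨p, List.mem_cons_of_mem _ hp, hr⟩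
      · rintro (hx | ⟨p, hp, h2, rfl⟩)
        · exact Or.inl hx
        · rcases List.mem_cons.mp hp with rfl | hp
          · exact absurd h2 hc
          · exact Or.inr ⟨p, hp, h2, rfl⟩

theorem pvMemB (l : List (List Int)) (x : Int) :
    x ∈ pvNotUniqueB l ↔ 2 ≤ (pvDistinct l).flatten.count x := by
  unfold pvNotUniqueB
  rw [← List.foldl_flatten, ← PySem.Dict.counter_eq_foldl, pvMemB_fold, PySem.Dict.items_counter]
  constructor
  · rintro (hx | ⟨p, hp, h2, hr⟩)
    · simp [PySem.Set.empty] at hx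
    · obtain ⟨k, hk, rfl⟩ := List.mem_map.mp hp
      simp only at h2 hr
      subst hr
      exact_mod_cast h2
  · intro h2
    refine Or.inr ⟨(x, ((pvDistinct l).flatten.count x : Int)), ?_, by simp; exact_mod_cast h2, rfl⟩
    refine List.mem_map.mpr ⟨x, ?_, rfl⟩
    rw [PySem.Set.mem_ofList]
    exact List.count_pos_iff.mp (by omega)

theorem pvCount_flatten (l : List (List Int)) (hnd : ∀ b ∈ l, b.Nodup) (x : Int) :
    l.flatten.count x = l.countP (fun b => decide (x ∈ b)) := by
  induction l with
  | nil => simp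
  | cons h t ih =>
    rw [List.flatten_cons, List.count_append, List.countP_cons,
      ih (fun b hb => hnd b (List.mem_cons_of_mem _ hb))]
    by_cases hx : x ∈ h
    · have h1 : h.count x = 1 := by
        have := List.nodup_iff_count_le_one.mp (hnd h List.mem_cons_self) x
        have := List.count_pos_iff.mpr hx
        omega
      rw [h1, if_pos (by simp [hx])]
      omega
    · rw [List.count_eq_zero.mpr hx, if_neg (by simp [hx])]
      omega

theorem pvCountP_two_of {α : Type} (p : α → Bool) (l : List α) (a b : α)
    (ha : a ∈ l) (hb : b ∈ l) (hne : a ≠ b) (hpa : p a = true) (hpb : p b = true) :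
    2 ≤ l.countP p := by
  induction l with
  | nil => simp at ha
  | cons h t ih =>
    rcases List.mem_cons.mp ha with rfl | ha'
    · have hb' : b ∈ t := by
        rcases List.mem_cons.mp hb with rfl | hb'
        · exact absurd rfl hne
        · exact hb'
      have h1 : 1 ≤ t.countP p := List.countP_pos_iff.mpr ⟨b, hb', hpb⟩
      rw [List.countP_cons, hpa, if_pos rfl]
      omega
    · rcases List.mem_cons.mp hb with rfl | hb'
      · have h1 : 1 ≤ t.countP p := List.countP_pos_iff.mpr ⟨a, ha', hpa⟩
        rw [List.countP_cons, hpb, if_pos rfl]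
        omega
      · have := ih ha' hb'
        rw [List.countP_cons]
        omega

theorem pvExists_pair_of_countP (x : Int) (l : List (List Int))
    (hpw : l.Pairwise (fun a b => PySem.Set.equal a b = false))
    (h2 : 2 ≤ l.countP (fun b => decide (x ∈ b))) :
    ∃ b1 ∈ l, ∃ b2 ∈ l, PySem.Set.equal b1 b2 = false ∧ x ∈ b1 ∧ x ∈ b2 := by
  induction l with
  | nil => simp at h2
  | cons h t ih =>
    rw [List.countP_cons] at h2
    by_cases hx : x ∈ h
    · have h1 : 1 ≤ t.countP (fun b => decide (x ∈ b)) := by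
        rw [if_pos (by simp [hx])] at h2; omega
      obtain ⟨b2, hb2, hxb2⟩ := List.countP_pos_iff.mp
        (show 0 < t.countP (fun b => decide (x ∈ b)) by omega)
      refine ⟨h, List.mem_cons_self, b2, List.mem_cons_of_mem _ hb2, ?_, hx, by simpa using hxb2⟩
      exact (List.pairwise_cons.mp hpw).1 b2 hb2
    · rw [if_neg (by simp [hx])] at h2
      obtain ⟨b1, hb1, b2, hb2, hr⟩ := ih (List.pairwise_cons.mp hpw).2 (by omega)
      exact ⟨b1, List.mem_cons_of_mem _ hb1, b2, List.mem_cons_of_mem _ hb2, hr⟩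

-- the central membership equivalence
theorem pvMain (l : List (List Int)) (hnd : ∀ b ∈ l, b.Nodup) (x : Int) :
    x ∈ pvNotUniqueA l ↔ x ∈ pvNotUniqueB l := by
  rw [pvMemA, pvMemB,
    pvCount_flatten _ (fun b hb => hnd b (pvDistinct_mem_of_mem l b hb))]
  constructor
  · rintro ⟨b1, hb1, b2, hb2, hne, hx1, hx2⟩
    obtain ⟨r1, hr1, hr1e⟩ := pvDistinct_cover l b1 hb1
    obtain ⟨r2, hr2, hr2e⟩ := pvDistinct_cover l b2 hb2
    have hxr1 : x ∈ r1 := ((pvEqual_iff r1 b1).mp hr1e x).mpr hx1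
    have hxr2 : x ∈ r2 := ((pvEqual_iff r2 b2).mp hr2e x).mpr hx2
    have hner : r1 ≠ r2 := by
      intro h; subst h
      have : PySem.Set.equal b1 b2 = true := by
        rw [pvEqual_iff]
        intro y
        exact Iff.trans ((pvEqual_iff r1 b1).mp hr1e y).symm ((pvEqual_iff r1 b2).mp hr2e y)
      simp [this] at hne
    exact pvCountP_two_of _ _ r1 r2 hr1 hr2 hner (by simpa using hxr1) (by simpa using hxr2)
  · intro h2
    obtain ⟨b1, hb1, b2, hb2, hne, hx1, hx2⟩ :=
      pvExists_pair_of_countP x (pvDistinct l) (pvDistinct_pairwise l) h2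
    exact ⟨b1, pvDistinct_mem_of_mem l b1 hb1, b2, pvDistinct_mem_of_mem l b2 hb2, hne, hx1, hx2⟩

theorem pvDiff_congr (s : List Int) (t1 t2 : PySem.Set Int) (h : ∀ x, x ∈ t1 ↔ x ∈ t2) :
    PySem.Set.diff s t1 = PySem.Set.diff s t2 := by
  unfold PySem.Set.diff
  apply List.filter_congr
  intro x _
  have hcc : PySem.Set.contains t1 x = PySem.Set.contains t2 x := by
    rw [Bool.eq_iff_iff, PySem.Set.contains_iff, PySem.Set.contains_iff]
    exact h x
  rw [hcc]

-- ===== VERDICT (by name: the statement is the Claim_ definition above) =====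
theorem strong_basins_spec : Claim_equal_strong_basins := by
  intro wb _ hpre
  have hnd : ∀ b ∈ (PySem.Dict.mk wb).values, b.Nodup := by
    intro b hb
    obtain ⟨p, hp, rfl⟩ := List.mem_map.mp hb
    exact hpre p hp
  have hd : ∀ s : List Int,
      PySem.Set.diff s (pvNotUniqueA (PySem.Dict.mk wb).values)
        = PySem.Set.diff s (pvNotUniqueB (PySem.Dict.mk wb).values) :=
    fun s => pvDiff_congr s _ _ (pvMain (PySem.Dict.mk wb).values hnd)
  simp only [Spec_strong_basins, strong_basins, strong_basins_alt, hd]
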